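-- pv_equiv track=rewrite | github.com/sahilcmd3/DSA-Questions | HackerRank/HackerLand Radio Transmitters.py | radio
-- ===== SOURCE A (Python) =====
-- def radio(x, k):
--     x.sort()
--     n=len(x)
--     i=0
--     transmitters=0
--
--     while i<n:
--         # Step 1: Find the farthest house within range k from x[i]
--         loc = x[i] + k
--         while i < n and x[i] <= loc:
--             i += 1
--
--         # Step 2: Place transmitter at the last house within range
--         i -= 1
--         transmitters += 1
--
--         # Step 3: Skip all houses covered by this transmitter
--         loc = x[i] + k
--         while i < n and x[i] <= loc:
--             i += 1
--
--     return transmitters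
-- ===== SOURCE B (Python) =====
-- def radio(x, k):
--     # single forward pass over the sorted houses with a small state machine:
--     # count of transmitters, right edge `cover` of the last placed transmitter,
--     # pending `reach` (= anchor + k) while still sliding the transmitter right,
--     # and `pos`, the best position found so far for the pending transmitter.
--     x.sort()
--     count = 0
--     cover = None
--     reach = None
--     pos = 0
--     for h in x:
--         if cover is not None and h <= cover:
--             continue
--         if reach is not None:
--             if h <= reach:
--                 pos = h
--                 continue
--             cover = pos + k
--             reach = None
--             if h <= cover:
--                 continue
--         count += 1
--         reach = h + k
--         pos = h
--     return count
-- ===== Notes on version B (the rewrite author's own statement) =====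
-- stated objective: alternative
-- what changed: Replaces A's index-jumping outer loop with two inner linear scans per transmitter by a single forward fold over the sorted list carrying a four-field state (count, cover edge, pending reach, best position).
import Mathlib
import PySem

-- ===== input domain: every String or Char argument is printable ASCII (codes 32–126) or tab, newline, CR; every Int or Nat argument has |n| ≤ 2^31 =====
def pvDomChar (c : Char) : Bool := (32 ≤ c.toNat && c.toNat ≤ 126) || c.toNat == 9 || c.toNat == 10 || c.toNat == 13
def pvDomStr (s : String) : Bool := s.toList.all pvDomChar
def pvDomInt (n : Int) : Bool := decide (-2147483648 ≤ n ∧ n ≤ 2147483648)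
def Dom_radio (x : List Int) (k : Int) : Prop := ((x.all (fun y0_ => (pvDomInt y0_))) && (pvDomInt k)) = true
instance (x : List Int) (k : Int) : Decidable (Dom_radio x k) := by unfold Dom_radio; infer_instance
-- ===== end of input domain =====

-- B replaces A's index-jumping pair of inner scans per transmitter by a single forward pass
-- over the sorted list with a four-field state machine (objective: alternative algorithm).
-- Both A and B sort x in place; the equivalence proved here is about the RETURN value only
-- (the mutation of x is identical anyway: a sort).

-- x[i] for an index known to be in range (Python raises on an out-of-range index; under
-- Pre_radio every index both programs form is in range, so the .getD 0 default is never taken).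
def pvAt (xs : List Int) (i : Int) : Int := (PySem.List.pyGet? xs i).getD 0

-- ===== PORT A =====
-- inner 'while i < n and x[i] <= loc: i += 1'.  The 0 ≤ i conjunct and the fuel only make the
-- recursion structural/total; under Pre_radio the fuel xs.length + 1 is never exhausted and the
-- loop is always entered with 0 ≤ i.
def radioAdv (xs : List Int) (loc : Int) : Int → Nat → Int
  | i, 0 => i
  | i, fuel+1 =>
    if 0 ≤ i ∧ i < (xs.length : Int) ∧ pvAt xs i ≤ loc then radioAdv xs loc (i + 1) fuel
    else i

-- outer 'while i < n' of A; fuel xs.length + 1 suffices on Pre_radio since i strictly increases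
def radioLoop (xs : List Int) (k : Int) : Int → Int → Nat → Int
  | _, t, 0 => t
  | i, t, fuel+1 =>
    if i < (xs.length : Int) then
      let i1 := radioAdv xs (pvAt xs i + k) i (xs.length + 1)
      let i2 := radioAdv xs (pvAt xs (i1 - 1) + k) (i1 - 1) (xs.length + 1)
      radioLoop xs k i2 (t + 1) fuel
    else t

def radio (x : List Int) (k : Int) : Int :=
  let xs := PySem.List.sorted x (fun v => v) false
  radioLoop xs k 0 0 (xs.length + 1)

-- ===== PORT B =====
-- Source B's loop body for one house h, on the state (count, cover, reach, pos); each
-- 'continue' of Source B is a branch returning the updated state.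
-- 'cover is not None and h <= cover'
def coverHit (cover : Option Int) (h : Int) : Bool :=
  match cover with | some c => decide (h ≤ c) | none => false

def radioStep (k : Int) (st : Int × Option Int × Option Int × Int) (h : Int) :
    Int × Option Int × Option Int × Int :=
  match st with
  | (t, cover, reach, pos) =>
    if coverHit cover h then (t, cover, reach, pos)
    else
      match reach with
      | some r =>
        if h ≤ r then (t, cover, reach, h)
        else if h ≤ pos + k then (t, some (pos + k), none, pos)
        else (t + 1, some (pos + k), some (h + k), h)
      | none => (t + 1, cover, some (h + k), h)

def radio_alt (x : List Int) (k : Int) : Int :=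
  let xs := PySem.List.sorted x (fun v => v) false
  (xs.foldl (radioStep k) (0, none, none, 0)).1

-- ===== PRECONDITION & SPEC =====
-- Pre_ excludes only nonempty x with k < 0: there Python A never terminates — the inner
-- scan cannot advance past the first house — so A returns on no excluded input.
def Pre_radio (x : List Int) (k : Int) : Prop := x = [] ∨ 0 ≤ k
instance (x : List Int) (k : Int) : Decidable (Pre_radio x k) := by unfold Pre_radio; infer_instance
def pvWitness_radio : List Int × Int := ([1, 5, 10, 2], 2)
def Spec_radio (x : List Int) (k : Int) (out : Int) : Prop := out = radio_alt x k
instance (x : List Int) (k : Int) (out : Int) : Decidable (Spec_radio x k out) := by unfold Spec_radio; infer_instance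

-- ===== CLAIM (what is proved, stated in full; the proofs are below) =====
def Claim_equal_radio : Prop := ∀ (x : List Int) (k : Int), Dom_radio x k → Pre_radio x k → Spec_radio x k (radio x k)

-- ===== LEMMAS AND PROOFS =====

-- the unique "insertion point" characterization of A's linear scans on a sorted list
def BisP (xs : List Int) (v r : Int) : Prop :=
  0 ≤ r ∧ r ≤ (xs.length : Int) ∧
  (∀ m : Int, 0 ≤ m → m < r → pvAt xs m ≤ v) ∧
  (∀ m : Int, r ≤ m → m < (xs.length : Int) → v < pvAt xs m)

lemma pvAt_mono {xs : List Int} (hs : xs.Pairwise (· ≤ ·)) {a b : Int}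
    (h0 : 0 ≤ a) (hab : a ≤ b) (hb : b < (xs.length : Int)) : pvAt xs a ≤ pvAt xs b := by
  rcases eq_or_lt_of_le hab with rfl | hlt
  · exact le_rfl
  · have ha' : a.toNat < xs.length := by omega
    have hb' : b.toNat < xs.length := by omega
    have := (List.pairwise_iff_getElem.mp hs) a.toNat b.toNat ha' hb' (by omega)
    simpa [pvAt, PySem.List.pyGet?_of_nonneg _ h0,
      PySem.List.pyGet?_of_nonneg _ (le_trans h0 hab), List.getElem?_eq_getElem, ha', hb'] using this

lemma pvAt_eq {xs : List Int} {i : Int} (h0 : 0 ≤ i) (hn : i.toNat < xs.length) :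
    pvAt xs i = xs[i.toNat] := by
  simp [pvAt, PySem.List.pyGet?_of_nonneg _ h0, List.getElem?_eq_getElem, hn]

-- radioAdv never moves left
lemma radioAdv_ge (xs : List Int) (loc : Int) :
    ∀ (fuel : Nat) (i : Int), i ≤ radioAdv xs loc i fuel := by
  intro fuel
  induction fuel with
  | zero => intro i; exact le_rfl
  | succ fuel ih =>
    intro i
    rw [radioAdv]
    split
    · exact le_trans (by omega) (ih (i + 1))
    · exact le_rfl

-- radioAdv strictly advances when the loop condition holds at entry
lemma radioAdv_gt {xs : List Int} {loc i : Int} (fuel : Nat)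
    (h : 0 ≤ i ∧ i < (xs.length : Int) ∧ pvAt xs i ≤ loc) :
    i < radioAdv xs loc i (fuel + 1) := by
  rw [radioAdv, if_pos h]
  exact lt_of_lt_of_le (by omega) (radioAdv_ge xs loc fuel (i + 1))

-- on a sorted list, with enough fuel, radioAdv from a position whose predecessors are all ≤ loc
-- computes the insertion point of loc
lemma radioAdv_BisP {xs : List Int} (hs : xs.Pairwise (· ≤ ·)) {loc : Int} :
    ∀ (fuel : Nat) (i : Int), 0 ≤ i → i ≤ (xs.length : Int) →
      (xs.length - i.toNat < fuel) →
      (∀ m : Int, 0 ≤ m → m < i → pvAt xs m ≤ loc) →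
      BisP xs loc (radioAdv xs loc i fuel) := by
  intro fuel
  induction fuel with
  | zero => intro i _ _ hf _; omega
  | succ fuel ih =>
    intro i h0 hn hf hpre
    rw [radioAdv]
    split
    · rename_i h
      exact ih (i + 1) (by omega) (by omega) (by omega)
        (fun m hm0 hmi => by
          rcases lt_or_ge m i with hm | hm
          · exact hpre m hm0 hm
          · have : m = i := by omega
            subst this; exact h.2.2)
    · rename_i h
      refine ⟨h0, hn, hpre, fun m hm hmn => ?_⟩
      have hin : i < (xs.length : Int) → loc < pvAt xs i := by
        intro hlt
        by_contra hc
        exact h ⟨h0, hlt, not_lt.mp hc⟩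
      rcases lt_or_ge i (xs.length : Int) with hlt | hge
      · exact lt_of_lt_of_le (hin hlt) (pvAt_mono hs h0 hm hmn)
      · omega

-- B's reach phase: while the houses stay ≤ reach, a step only slides pos to the current house
lemma fold_reach_phase {xs : List Int} {k loc : Int} {o : Option Int} {t i1 i0 : Int}
    (hi1 : i1 ≤ (xs.length : Int))
    (hle : ∀ m : Int, 0 ≤ m → m < i1 → pvAt xs m ≤ loc)
    (ho : ∀ c, o = some c → ∀ m : Int, i0 ≤ m → m < (xs.length : Int) → c < pvAt xs m) :
    ∀ (d j : Nat), i0 ≤ (j : Int) → (j : Int) ≤ i1 → d = i1.toNat - j → 0 < j →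
      ((xs.drop j).foldl (radioStep k) (t, o, some loc, pvAt xs ((j : Int) - 1))).1
        = ((xs.drop i1.toNat).foldl (radioStep k) (t, o, some loc, pvAt xs (i1 - 1))).1 := by
  intro d
  induction d with
  | zero =>
    intro j _ hj hd _
    have : (j : Int) = i1 := by omega
    rw [this]
    have : j = i1.toNat := by omega
    rw [this]
  | succ d ih =>
    intro j hj0' hj hd hj0
    have hjlt : (j : Int) < i1 := by omega
    have hjn : j < xs.length := by omega
    rw [List.drop_eq_getElem_cons hjn, List.foldl_cons]
    have hget : xs[j] = pvAt xs (j : Int) :=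
      (pvAt_eq (xs := xs) (i := (j : Int)) (by omega) (by simpa using hjn)).symm
    have hstep : radioStep k (t, o, some loc, pvAt xs ((j : Int) - 1)) xs[j]
        = (t, o, some loc, pvAt xs ((j : Int))) := by
      rw [hget]
      unfold radioStep
      have hb : coverHit o (pvAt xs (j:Int)) = false := by
        cases o with
        | none => rfl
        | some c =>
          simp only [coverHit, decide_eq_false_iff_not, not_le]
          exact ho c rfl _ (by omega) (by omega)
      simp [hb, hle (j : Int) (by omega) hjlt]
    rw [hstep]
    have : ((j : Int) + 1) - 1 = ((j + 1 : Nat) : Int) - 1 := by push_cast; ring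
    have := ih (j + 1) (by omega) (by omega) (by omega) (by omega)
    simpa using this

-- B's skip phase: houses ≤ cover are skipped without touching the state
lemma fold_skip_phase {xs : List Int} {k c : Int} {t p i2 : Int}
    (hi2 : i2 ≤ (xs.length : Int))
    (hle : ∀ m : Int, 0 ≤ m → m < i2 → pvAt xs m ≤ c) :
    ∀ (d j : Nat), (j : Int) ≤ i2 → d = i2.toNat - j →
      ((xs.drop j).foldl (radioStep k) (t, some c, none, p)).1
        = ((xs.drop i2.toNat).foldl (radioStep k) (t, some c, none, p)).1 := by
  intro d
  induction d with
  | zero =>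
    intro j hj hd
    have : j = i2.toNat := by omega
    rw [this]
  | succ d ih =>
    intro j hj hd
    have hjlt : (j : Int) < i2 := by omega
    have hjn : j < xs.length := by omega
    rw [List.drop_eq_getElem_cons hjn, List.foldl_cons]
    have hget : xs[j] = pvAt xs (j : Int) :=
      (pvAt_eq (xs := xs) (i := (j : Int)) (by omega) (by simpa using hjn)).symm
    have hstep : radioStep k (t, some c, none, p) xs[j] = (t, some c, none, p) := by
      rw [hget]; unfold radioStep
      simp [coverHit, hle (j : Int) (by omega) hjlt]
    rw [hstep]
    exact ih (j + 1) (by omega) (by omega)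

-- finalizing the pending transmitter (cover := pos + k, reach := None, fall through) processes
-- the current house exactly as a fresh step with cover = pos + k would
lemma fold_bridge {k loc pos t : Int} {o : Option Int} {h : Int} (rest : List Int)
    (hgt : loc < h) (ho : ∀ c, o = some c → c < h) :
    ((h :: rest).foldl (radioStep k) (t, o, some loc, pos)).1
      = ((h :: rest).foldl (radioStep k) (t, some (pos + k), none, pos)).1 := by
  have hb : coverHit o h = false := by
    cases o with
    | none => rfl
    | some c => simp only [coverHit, decide_eq_false_iff_not, not_le]; exact ho c rfl
  rw [List.foldl_cons, List.foldl_cons]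
  cases o with
  | none =>
    by_cases hc : h ≤ pos + k <;>
      simp [radioStep, coverHit, hc, not_le.mpr hgt]
  | some c =>
    have hch : ¬ h ≤ c := not_le.mpr (ho c rfl)
    by_cases hc : h ≤ pos + k <;>
      simp [radioStep, coverHit, hch, hc, not_le.mpr hgt]

-- main correspondence: A's outer loop at index i equals B's fold over the remaining suffix
set_option maxRecDepth 4000 in
set_option maxHeartbeats 1000000 in
lemma loop_eq_fold {xs : List Int} (hs : xs.Pairwise (· ≤ ·)) {k : Int} (hk : 0 ≤ k) :
    ∀ (fuel : Nat) (i t : Int) (o : Option Int) (p : Int), 0 ≤ i → i ≤ (xs.length : Int) →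
      xs.length - i.toNat < fuel →
      (∀ c, o = some c → ∀ m : Int, i ≤ m → m < (xs.length : Int) → c < pvAt xs m) →
      radioLoop xs k i t fuel = ((xs.drop i.toNat).foldl (radioStep k) (t, o, none, p)).1 := by
  intro fuel
  induction fuel with
  | zero => intro i t o p h0 hn hf _; omega
  | succ fuel ih =>
    intro i t o p h0 hn hf ho
    rw [radioLoop]
    split
    · rename_i hin
      -- A's first scan: insertion point i1 of loc = x[i] + k
      set loc := pvAt xs i + k with hloc
      have hA1 : BisP xs loc (radioAdv xs loc i (xs.length + 1)) :=
        radioAdv_BisP hs _ i h0 (by omega) (by omega)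
          (fun m hm0 hmi => le_trans (pvAt_mono hs hm0 (show m ≤ i by omega) hin)
            (show pvAt xs i ≤ pvAt xs i + k by omega))
      set i1 := radioAdv xs loc i (xs.length + 1) with hi1
      have hi1g : i < i1 := radioAdv_gt _ ⟨h0, hin, by omega⟩
      obtain ⟨hA1a, hA1b, hA1c, hA1d⟩ := hA1
      -- A's second scan: insertion point i2 of loc2 = x[i1-1] + k
      set loc2 := pvAt xs (i1 - 1) + k with hloc2
      have hA2 : BisP xs loc2 (radioAdv xs loc2 (i1 - 1) (xs.length + 1)) :=
        radioAdv_BisP hs _ (i1 - 1) (by omega) (by omega) (by omega)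
          (fun m hm0 hmj => le_trans
            (pvAt_mono hs hm0 (show m ≤ i1 - 1 by omega) (show i1 - 1 < (xs.length : Int) by omega))
            (show pvAt xs (i1 - 1) ≤ pvAt xs (i1 - 1) + k by omega))
      set i2 := radioAdv xs loc2 (i1 - 1) (xs.length + 1) with hi2
      have hi2g : i1 - 1 < i2 := radioAdv_gt _ ⟨by omega, by omega, by omega⟩
      obtain ⟨hA2a, hA2b, hA2c, hA2d⟩ := hA2
      -- B side: first step on x[i] starts a transmitter
      have hilt : i.toNat < xs.length := by omega
      have hdrop : xs.drop i.toNat = xs[i.toNat] :: xs.drop (i.toNat + 1) :=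
        List.drop_eq_getElem_cons hilt
      have hget : xs[i.toNat] = pvAt xs i :=
        (pvAt_eq h0 (by omega)).symm
      have hstep0 : radioStep k (t, o, none, p) xs[i.toNat]
          = (t + 1, o, some loc, pvAt xs i) := by
        rw [hget]; unfold radioStep
        have hb : coverHit o (pvAt xs i) = false := by
          cases o with
          | none => rfl
          | some c =>
            simp only [coverHit, decide_eq_false_iff_not, not_le]
            exact ho c rfl i (le_refl i) hin
        simp [hb]
        exact hloc.symm
      rw [hdrop, List.foldl_cons, hstep0]
      -- reach phase up to i1
      have hreach := fold_reach_phase (xs := xs) (k := k) (o := o) (t := t + 1) (i0 := i)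
        hA1b hA1c ho
        (i1.toNat - (i.toNat + 1)) (i.toNat + 1) (by omega) (by omega) (by omega) (by omega)
      have hcast : ((i.toNat + 1 : Nat) : Int) - 1 = i := by omega
      rw [hcast] at hreach
      rw [hreach]
      -- bridge + skip phase + induction hypothesis at i2
      rcases lt_or_ge i1 (xs.length : Int) with hlt | hge
      · have hi1lt : i1.toNat < xs.length := by omega
        have hdrop1 : xs.drop i1.toNat = xs[i1.toNat] :: xs.drop (i1.toNat + 1) :=
          List.drop_eq_getElem_cons hi1lt
        have hget1 : xs[i1.toNat] = pvAt xs i1 :=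
          (pvAt_eq (by omega) (by omega)).symm
        have hbr := fold_bridge (k := k) (loc := loc) (pos := pvAt xs (i1 - 1)) (t := t + 1)
          (o := o) (h := xs[i1.toNat]) (xs.drop (i1.toNat + 1))
          (by rw [hget1]; exact hA1d i1 le_rfl hlt)
          (fun c hc => by rw [hget1]; exact ho c hc i1 (by omega) hlt)
        rw [hdrop1, hbr, ← hdrop1]
        have hskip := fold_skip_phase (xs := xs) (k := k) (c := loc2) (t := t + 1)
          (p := pvAt xs (i1 - 1)) hA2b hA2c (i2.toNat - i1.toNat) i1.toNat (by omega) rfl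
        rw [hskip]
        show radioLoop xs k i2 (t + 1) fuel
          = ((xs.drop i2.toNat).foldl (radioStep k) (t + 1, some loc2, none, pvAt xs (i1 - 1))).1
        exact ih i2 (t + 1) (some loc2) (pvAt xs (i1 - 1)) (by omega) hA2b (by omega)
          (fun c hc m hm hmn => by
            cases hc; exact hA2d m (by omega) hmn)
      · -- i1 = n: no house beyond reach; both sides finish with t + 1
        have hi2n : i2 = (xs.length : Int) := by omega
        have hloopend : radioLoop xs k i2 (t + 1) fuel = t + 1 := by
          rw [hi2n]
          cases fuel with
          | zero => rfl
          | succ f => rw [radioLoop]; simp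
        show radioLoop xs k i2 (t + 1) fuel
          = ((xs.drop i1.toNat).foldl (radioStep k) (t + 1, o, some loc, pvAt xs (i1 - 1))).1
        rw [hloopend]
        have hnil : xs.drop i1.toNat = [] := by
          apply List.drop_eq_nil_of_le
          omega
        rw [hnil]
        rfl
    · rename_i hin
      have : i.toNat = xs.length := by omega
      rw [this]
      simp

-- ===== VERDICT (by name: the statement is the Claim_ definition above) =====
theorem radio_spec : Claim_equal_radio := by
  intro x k _ hpre
  unfold Spec_radio radio radio_alt
  rcases hpre with rfl | hk
  · rfl
  · have hs := PySem.List.sorted_pairwise x (fun v => v)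
    have := loop_eq_fold (xs := PySem.List.sorted x (fun v => v) false) (by simpa using hs) hk
      ((PySem.List.sorted x (fun v => v) false).length + 1) 0 0 none 0
      le_rfl (by omega) (by omega) (by simp)
    simpa using this
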